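-- pv_equiv track=rewrite | github.com/Deen-Ma/openagent-pal | p2p_capacity_work/scripts/scalebench_remote_bench.py | choose_publishers
-- ===== SOURCE A (Python) =====
-- def choose_publishers(node_count: int, api_base: int, seed_indexes: list[int]) -> tuple[list[int], list[str]]:
--     seeds = sorted(set(seed_indexes))
--     seed0 = seeds[0]
--     seed1 = seeds[1] if len(seeds) > 1 else seed0
--     non_seed_indexes = [index for index in range(1, node_count + 1) if index not in seeds]
--     if non_seed_indexes:
--         first_non_seed = non_seed_indexes[0]
--         median_non_seed = non_seed_indexes[len(non_seed_indexes) // 2]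
--         last_non_seed = non_seed_indexes[-1]
--     else:
--         first_non_seed = seed0
--         median_non_seed = seed0
--         last_non_seed = seed0
--     publisher_indexes = [seed0, first_non_seed, median_non_seed, last_non_seed, seed1]
--     roles = [
--         "seed_0",
--         "first_non_seed",
--         "median_non_seed",
--         "last_non_seed",
--         "seed_1_or_seed_0",
--     ]
--     ports = [api_base + index - 1 for index in publisher_indexes]
--     return ports, roles
-- ===== SOURCE B (Python) =====
-- def choose_publishers(node_count: int, api_base: int, seed_indexes: list[int]) -> tuple[list[int], list[str]]:
--     # Rank-counting over the sorted seed set: the k-th non-seed index is found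
--     # arithmetically, without scanning range(1, node_count + 1).
--     seeds = sorted(set(seed_indexes))
--     seed0 = seeds[0]
--     seed1 = seeds[1] if len(seeds) > 1 else seed0
--     in_range = [s for s in seeds if 1 <= s <= node_count]
--     missing = node_count - len(in_range)
--
--     def kth(k: int) -> int:
--         t = k + 1
--         for s in in_range:
--             if s <= t:
--                 t += 1
--             else:
--                 break
--         return t
--
--     if missing > 0:
--         first_non_seed = kth(0)
--         median_non_seed = kth(missing // 2)
--         last_non_seed = kth(missing - 1)
--     else:
--         first_non_seed = median_non_seed = last_non_seed = seed0
--     publisher_indexes = [seed0, first_non_seed, median_non_seed, last_non_seed, seed1]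
--     roles = [
--         "seed_0",
--         "first_non_seed",
--         "median_non_seed",
--         "last_non_seed",
--         "seed_1_or_seed_0",
--     ]
--     ports = [api_base + index - 1 for index in publisher_indexes]
--     return ports, roles
-- ===== Notes on version B (the rewrite author's own statement) =====
-- stated objective: faster
-- what changed: Instead of materialising and filtering range(1, node_count+1) against the seed list (a scan of node_count elements with a list-membership test each), B counts ranks over the sorted in-range seeds and computes the first/median/last non-seed indices arithmetically (k-th missing number), never touching the range.
import Mathlib
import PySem

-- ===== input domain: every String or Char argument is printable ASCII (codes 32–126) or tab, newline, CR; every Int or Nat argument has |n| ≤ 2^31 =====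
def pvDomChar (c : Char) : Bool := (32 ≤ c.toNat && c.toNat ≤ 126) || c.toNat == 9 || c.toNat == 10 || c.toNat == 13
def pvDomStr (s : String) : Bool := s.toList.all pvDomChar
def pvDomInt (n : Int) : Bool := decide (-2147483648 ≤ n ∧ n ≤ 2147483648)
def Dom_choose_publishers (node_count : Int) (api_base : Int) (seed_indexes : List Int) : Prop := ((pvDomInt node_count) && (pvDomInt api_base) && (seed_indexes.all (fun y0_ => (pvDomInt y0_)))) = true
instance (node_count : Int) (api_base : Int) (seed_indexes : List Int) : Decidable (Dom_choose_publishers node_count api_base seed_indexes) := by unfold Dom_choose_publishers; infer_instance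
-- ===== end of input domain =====

-- B replaces A's scan of range(1, node_count+1) by rank counting over the sorted
-- in-range seeds: the first/median/last non-seed indices are computed as k-th
-- missing numbers (objective: faster, asymptotic).

-- ===== PORT A =====
def choose_publishers (node_count : Int) (api_base : Int) (seed_indexes : List Int) : List Int × List String :=
  let seeds := PySem.List.sorted (PySem.Set.ofList seed_indexes) (fun x => x) false
  let seed0 := PySem.List.pyGetD seeds 0 0      -- seeds[0]; IndexError when seeds = [] is excluded by Pre_
  let seed1 := if seeds.length > 1 then PySem.List.pyGetD seeds 1 0 else seed0
  let non_seed_indexes := (PySem.List.pyRange 1 (node_count + 1) 1).filter (fun i => !seeds.contains i)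
  let fml : Int × Int × Int :=
    if non_seed_indexes ≠ [] then
      (PySem.List.pyGetD non_seed_indexes 0 0,
       PySem.List.pyGetD non_seed_indexes (PySem.Int.floordiv (non_seed_indexes.length : Int) 2) 0,
       PySem.List.pyGetD non_seed_indexes (-1) 0)
    else (seed0, seed0, seed0)
  let publisher_indexes := [seed0, fml.1, fml.2.1, fml.2.2, seed1]
  let roles := ["seed_0", "first_non_seed", "median_non_seed", "last_non_seed", "seed_1_or_seed_0"]
  (publisher_indexes.map (fun i => api_base + i - 1), roles)

-- ===== PORT B =====
-- the loop body of Source B's kth: t = k+1; for s in in_range: if s <= t: t += 1 else: break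
def pvKthGo (in_range : List Int) (t : Int) : Int :=
  match in_range with
  | [] => t
  | s :: rest => if s ≤ t then pvKthGo rest (t + 1) else t

def pvKth (in_range : List Int) (k : Int) : Int := pvKthGo in_range (k + 1)

def choose_publishers_alt (node_count : Int) (api_base : Int) (seed_indexes : List Int) : List Int × List String :=
  let seeds := PySem.List.sorted (PySem.Set.ofList seed_indexes) (fun x => x) false
  let seed0 := PySem.List.pyGetD seeds 0 0
  let seed1 := if seeds.length > 1 then PySem.List.pyGetD seeds 1 0 else seed0
  let in_range := seeds.filter (fun s => decide (1 ≤ s) && decide (s ≤ node_count))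
  let missing : Int := node_count - in_range.length
  let fml : Int × Int × Int :=
    if missing > 0 then
      (pvKth in_range 0, pvKth in_range (PySem.Int.floordiv missing 2), pvKth in_range (missing - 1))
    else (seed0, seed0, seed0)
  let publisher_indexes := [seed0, fml.1, fml.2.1, fml.2.2, seed1]
  let roles := ["seed_0", "first_non_seed", "median_non_seed", "last_non_seed", "seed_1_or_seed_0"]
  (publisher_indexes.map (fun i => api_base + i - 1), roles)

-- ===== PRECONDITION & SPEC =====
-- Pre_ excludes only seed_indexes = [], on which Python A raises IndexError at seeds[0].
def Pre_choose_publishers (node_count : Int) (api_base : Int) (seed_indexes : List Int) : Prop :=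
  seed_indexes ≠ []
instance (node_count : Int) (api_base : Int) (seed_indexes : List Int) : Decidable (Pre_choose_publishers node_count api_base seed_indexes) := by unfold Pre_choose_publishers; infer_instance

def pvWitness_choose_publishers : Int × Int × List Int := (3, 8000, [1])

def Spec_choose_publishers (node_count : Int) (api_base : Int) (seed_indexes : List Int) (out : List Int × List String) : Prop := out = choose_publishers_alt node_count api_base seed_indexes
instance (node_count : Int) (api_base : Int) (seed_indexes : List Int) (out : List Int × List String) : Decidable (Spec_choose_publishers node_count api_base seed_indexes out) := by unfold Spec_choose_publishers; infer_instance

-- ===== CLAIM (what is proved, stated in full; the proofs are below) =====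
def Claim_equal_choose_publishers : Prop := ∀ (node_count : Int) (api_base : Int) (seed_indexes : List Int), Dom_choose_publishers node_count api_base seed_indexes → Pre_choose_publishers node_count api_base seed_indexes → Spec_choose_publishers node_count api_base seed_indexes (choose_publishers node_count api_base seed_indexes)

-- ===== LEMMAS AND PROOFS =====

-- an Int range of given length, for induction
def pvIrange (a : Int) : Nat → List Int
  | 0 => []
  | n + 1 => a :: pvIrange (a + 1) n

lemma pvMem_irange : ∀ (n : Nat) (a x : Int), x ∈ pvIrange a n ↔ a ≤ x ∧ x < a + n := by
  intro n
  induction n with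
  | zero =>
      intro a x
      simp only [pvIrange, List.not_mem_nil, false_iff, not_and, not_lt]
      omega
  | succ n ih =>
      intro a x
      simp only [pvIrange, List.mem_cons, ih (a + 1) x]
      push_cast
      omega

lemma pvPyRange_eq_irange : ∀ (n : Nat) (a : Int), PySem.List.pyRange a (a + n) 1 = pvIrange a n := by
  intro n
  induction n with
  | zero => intro a; simp [pvIrange, PySem.List.pyRange_one_eq_nil]
  | succ n ih =>
      intro a
      rw [PySem.List.pyRange_one_cons (by push_cast; omega)]
      have : a + (n + 1 : Nat) = (a + 1) + (n : Nat) := by push_cast; omega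
      rw [this, ih (a + 1)]
      rfl

lemma pvLen_irange : ∀ (n : Nat) (a : Int), (pvIrange a n).length = n := by
  intro n
  induction n with
  | zero => intro a; rfl
  | succ n ih => intro a; simp [pvIrange, ih]

lemma pvGet_irange : ∀ (n k : Nat) (a : Int), k < n → (pvIrange a n)[k]? = some (a + k) := by
  intro n
  induction n with
  | zero => intro k a h; omega
  | succ n ih =>
      intro k a h
      cases k with
      | zero => simp [pvIrange]
      | succ k =>
          simp only [pvIrange, List.getElem?_cons_succ]
          rw [ih k (a + 1) (by omega)]
          congr 1
          push_cast
          ring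

-- main rank-counting lemma: for a strictly increasing list of "seeds" lying in
-- [a, a+n), the k-th element of the filtered range is pvKthGo in_range (a+k)
lemma pvMain : ∀ (n : Nat) (a : Int) (inr : List Int),
    List.Pairwise (· < ·) inr → (∀ s ∈ inr, a ≤ s ∧ s < a + n) →
    inr.length ≤ n ∧
    ((pvIrange a n).filter (fun i => !inr.contains i)).length = n - inr.length ∧
    (∀ k : Nat, k < ((pvIrange a n).filter (fun i => !inr.contains i)).length →
      ((pvIrange a n).filter (fun i => !inr.contains i))[k]? = some (pvKthGo inr (a + k))) := by
  intro n
  induction n with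
  | zero =>
      intro a inr hp hb
      have hnil : inr = [] := by
        cases inr with
        | nil => rfl
        | cons s r =>
            have h := hb s (by simp)
            exfalso
            simp at h
            omega
      subst hnil
      simp [pvIrange]
  | succ n ih =>
      intro a inr hp hb
      cases inr with
      | nil =>
          refine ⟨by simp, ?_, ?_⟩
          · simp [pvLen_irange]
          · intro k hk
            simp only [List.contains_nil, Bool.not_false, List.filter_true] at hk ⊢
            rw [pvGet_irange _ _ _ (by simpa [pvLen_irange] using hk)]
            rfl
      | cons s rest =>
          have hsa : a ≤ s := (hb s (by simp)).1
          have hrest : ∀ x ∈ rest, s < x := (List.pairwise_cons.mp hp).1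
          by_cases hs : s = a
          · subst hs
            have hbounds : ∀ x ∈ rest, s + 1 ≤ x ∧ x < (s + 1) + n := by
              intro x hx
              have h1 := hrest x hx
              have h2 := (hb x (by simp [hx])).2
              push_cast at h2 ⊢
              omega
            obtain ⟨ih1, ih2, ih3⟩ := ih (s + 1) rest (List.pairwise_cons.mp hp).2 hbounds
            have hfc : (pvIrange (s + 1) n).filter (fun i => !(s :: rest).contains i)
                = (pvIrange (s + 1) n).filter (fun i => !rest.contains i) := by
              apply List.filter_congr
              intro x hx
              have hxa : s + 1 ≤ x := ((pvMem_irange n (s + 1) x).mp hx).1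
              have hxs : (x == s) = false := by
                simp only [beq_eq_false_iff_ne, ne_eq]
                omega
              simp [hxs]
              intro _
              omega
            have hF : (pvIrange s (n + 1)).filter (fun i => !(s :: rest).contains i)
                = (pvIrange (s + 1) n).filter (fun i => !rest.contains i) := by
              rw [show pvIrange s (n + 1) = s :: pvIrange (s + 1) n from rfl]
              rw [List.filter_cons, ← hfc]
              simp
            rw [hF]
            refine ⟨?_, ?_, ?_⟩
            · simp only [List.length_cons]; omega
            · rw [ih2]; simp only [List.length_cons]; omega
            · intro k hk
              rw [ih3 k hk]
              have hle : s ≤ s + (k : Int) := by omega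
              simp only [pvKthGo, if_pos hle]
              congr 2
              omega
          · have hlt : a < s := lt_of_le_of_ne hsa (fun h => hs h.symm)
            have hbounds : ∀ x ∈ s :: rest, (a + 1) ≤ x ∧ x < (a + 1) + n := by
              intro x hx
              have h2 := (hb x hx).2
              rcases List.mem_cons.mp hx with h | h
              · subst h; push_cast at h2 ⊢; omega
              · have := hrest x h; push_cast at h2 ⊢; omega
            obtain ⟨ih1, ih2, ih3⟩ := ih (a + 1) (s :: rest) hp hbounds
            have hna : ((s :: rest).contains a) = false := by
              simp only [List.contains_eq_mem, decide_eq_false_iff_not]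
              intro h
              rcases List.mem_cons.mp h with h | h
              · omega
              · have := hrest a h; omega
            have hF : (pvIrange a (n + 1)).filter (fun i => !(s :: rest).contains i)
                = a :: (pvIrange (a + 1) n).filter (fun i => !(s :: rest).contains i) := by
              rw [show pvIrange a (n + 1) = a :: pvIrange (a + 1) n from rfl]
              rw [List.filter_cons, hna]
              simp
            rw [hF]
            refine ⟨?_, ?_, ?_⟩
            · simp only [List.length_cons] at ih1 ⊢; omega
            · simp only [List.length_cons] at ih1 ⊢
              rw [ih2]
              simp only [List.length_cons]
              omega
            · intro k hk
              cases k with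
              | zero =>
                  simp only [List.getElem?_cons_zero, pvKthGo]
                  rw [if_neg (by push_cast; omega)]
                  norm_num
              | succ k =>
                  simp only [List.getElem?_cons_succ]
                  rw [ih3 k (by simp only [List.length_cons] at hk; omega)]
                  congr 2
                  push_cast
                  ring

-- the non-seed triple of A equals the rank-counting triple of B
lemma pvTriple (node_count : Int) (seeds : List Int) (seed0 : Int)
    (hp : List.Pairwise (· < ·) seeds) :
    (if ((PySem.List.pyRange 1 (node_count + 1) 1).filter (fun i => !seeds.contains i)) ≠ [] then
       (PySem.List.pyGetD ((PySem.List.pyRange 1 (node_count + 1) 1).filter (fun i => !seeds.contains i)) 0 0,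
        PySem.List.pyGetD ((PySem.List.pyRange 1 (node_count + 1) 1).filter (fun i => !seeds.contains i))
          (PySem.Int.floordiv ((((PySem.List.pyRange 1 (node_count + 1) 1).filter (fun i => !seeds.contains i)).length : Int)) 2) 0,
        PySem.List.pyGetD ((PySem.List.pyRange 1 (node_count + 1) 1).filter (fun i => !seeds.contains i)) (-1) 0)
     else (seed0, seed0, seed0))
    =
    (if node_count - ((seeds.filter (fun s => decide (1 ≤ s) && decide (s ≤ node_count))).length : Int) > 0 then
       (pvKth (seeds.filter (fun s => decide (1 ≤ s) && decide (s ≤ node_count))) 0,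
        pvKth (seeds.filter (fun s => decide (1 ≤ s) && decide (s ≤ node_count)))
          (PySem.Int.floordiv (node_count - ((seeds.filter (fun s => decide (1 ≤ s) && decide (s ≤ node_count))).length : Int)) 2),
        pvKth (seeds.filter (fun s => decide (1 ≤ s) && decide (s ≤ node_count)))
          (node_count - ((seeds.filter (fun s => decide (1 ≤ s) && decide (s ≤ node_count))).length : Int) - 1))
     else (seed0, seed0, seed0)) := by
  set inr := seeds.filter (fun s => decide (1 ≤ s) && decide (s ≤ node_count)) with hinr_def
  by_cases hn : node_count ≤ 0
  · have hrange : PySem.List.pyRange 1 (node_count + 1) 1 = [] :=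
      PySem.List.pyRange_one_eq_nil (by omega)
    have hinr : inr = [] := by
      rw [hinr_def]
      apply List.filter_eq_nil_iff.mpr
      intro x hx
      simp only [Bool.and_eq_true, decide_eq_true_eq, not_and]
      omega
    rw [hrange, hinr]
    simp only [List.filter_nil, ne_eq, not_true_eq_false, if_false, List.length_nil,
      Nat.cast_zero, sub_zero]
    rw [if_neg (by omega)]
  · rw [not_le] at hn
    have hN : ((node_count.toNat : Int)) = node_count := Int.toNat_of_nonneg (by omega)
    have hR : PySem.List.pyRange 1 (node_count + 1) 1 = pvIrange 1 node_count.toNat := by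
      have h := pvPyRange_eq_irange node_count.toNat 1
      rw [show (1 : Int) + node_count.toNat = node_count + 1 by omega] at h
      exact h
    have hpair : List.Pairwise (· < ·) inr := hp.filter _
    have hbnds : ∀ x ∈ inr, 1 ≤ x ∧ x < 1 + node_count.toNat := by
      intro x hx
      rw [hinr_def] at hx
      have := List.mem_filter.mp hx
      simp only [Bool.and_eq_true, decide_eq_true_eq] at this
      omega
    obtain ⟨h1, h2, h3⟩ := pvMain node_count.toNat 1 inr hpair hbnds
    have hFilt : (PySem.List.pyRange 1 (node_count + 1) 1).filter (fun i => !seeds.contains i)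
        = (pvIrange 1 node_count.toNat).filter (fun i => !inr.contains i) := by
      rw [hR]
      apply List.filter_congr
      intro x hx
      have hb := (pvMem_irange node_count.toNat 1 x).mp hx
      have hiff : x ∈ inr ↔ x ∈ seeds := by
        rw [hinr_def]
        simp only [List.mem_filter, Bool.and_eq_true, decide_eq_true_eq]
        constructor
        · exact fun h => h.1
        · intro h
          exact ⟨h, by omega, by omega⟩
      simp only [List.contains_eq_mem]
      congr 1
      exact decide_eq_decide.mpr hiff.symm
    rw [hFilt]
    set G := (pvIrange 1 node_count.toNat).filter (fun i => !inr.contains i) with hG_def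
    have hm : node_count - (inr.length : Int) = (G.length : Int) := by
      rw [hG_def, h2]
      omega
    by_cases hGnil : G = []
    · have hlen0 : G.length = 0 := by rw [hGnil]; rfl
      rw [if_neg (by simp [hGnil]), if_neg (by omega)]
    · have hlen : 0 < G.length := List.length_pos_of_ne_nil hGnil
      rw [if_pos hGnil, if_pos (by omega)]
      refine Prod.ext ?_ (Prod.ext ?_ ?_)
      · -- first
        show PySem.List.pyGetD G 0 0 = pvKth inr 0
        rw [PySem.List.pyGetD_zero, List.getD_eq_getElem?_getD, h3 0 hlen]
        show pvKthGo inr (1 + ((0 : Nat) : Int)) = pvKth inr 0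
        unfold pvKth
        norm_num
      · -- median
        show PySem.List.pyGetD G (PySem.Int.floordiv (G.length : Int) 2) 0
            = pvKth inr (PySem.Int.floordiv (node_count - (inr.length : Int)) 2)
        rw [hm]
        have hfl : PySem.Int.floordiv ((G.length : Int)) 2 = ((G.length / 2 : Nat) : Int) :=
          PySem.Int.floordiv_natCast _ 2
        rw [hfl, PySem.List.pyGetD_natCast, List.getD_eq_getElem?_getD,
          h3 (G.length / 2) (by omega)]
        unfold pvKth
        show pvKthGo inr (1 + ((G.length / 2 : Nat) : Int)) = pvKthGo inr (((G.length / 2 : Nat) : Int) + 1)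
        congr 1
        omega
      · -- last
        show PySem.List.pyGetD G (-1) 0 = pvKth inr (node_count - (inr.length : Int) - 1)
        rw [hm]
        rw [PySem.List.pyGetD_neg_ofNat G 1 0 (by omega) (by omega)]
        have hb : G.length - 1 < G.length := by omega
        have h4 := h3 (G.length - 1) hb
        rw [List.getElem?_eq_getElem hb] at h4
        rw [Option.some.injEq] at h4
        rw [h4]
        unfold pvKth
        congr 1
        omega

-- ===== VERDICT (by name: the statement is the Claim_ definition above) =====
theorem choose_publishers_spec : Claim_equal_choose_publishers := by
  intro node_count api_base seed_indexes hdom hpre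
  unfold Spec_choose_publishers choose_publishers choose_publishers_alt
  simp only []
  rw [pvTriple node_count (PySem.List.sorted (PySem.Set.ofList seed_indexes) (fun x => x) false)
      (PySem.List.pyGetD (PySem.List.sorted (PySem.Set.ofList seed_indexes) (fun x => x) false) 0 0)
      (PySem.List.sorted_ofList_pairwise_lt seed_indexes)]
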